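-- pv_equiv track=rewrite | github.com/pypi-data/pypi-mirror-361 | packages/pyvvisf/pyvvisf-0.6.0.tar.gz/pyvvisf-0.6.0/src/pyvvisf/shader_compiler.py | patch_legacy_gl_fragcolor
-- ===== SOURCE A (Python) =====
-- def patch_legacy_gl_fragcolor(source: str) -> str:
--     """Patch fragment shader to support legacy gl_FragColor in GLSL 330+."""
--     lines = source.splitlines()
--     version_idx = None
--     for i, line in enumerate(lines):
--         if line.strip().startswith('#version'):
--             version_idx = i
--             break
--
--     uses_gl_fragcolor = any('gl_FragColor' in l for l in lines)
--     already_has_out = any('out vec4' in l for l in lines)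
--     already_has_define = any('#define gl_FragColor' in l for l in lines)
--
--     if uses_gl_fragcolor:
--         insert_idx = version_idx + 1 if version_idx is not None else 0
--         if not already_has_out:
--             lines.insert(insert_idx, 'out vec4 fragColor;')
--             insert_idx += 1
--         if not already_has_define:
--             lines.insert(insert_idx, '#define gl_FragColor fragColor')
--
--         # Replace all assignments to gl_FragColor with fragColor
--         for i, line in enumerate(lines):
--             if 'gl_FragColor' in line and not line.strip().startswith('#define'):
--                 lines[i] = line.replace('gl_FragColor', 'fragColor')
--
--     return '\n'.join(lines)
-- ===== SOURCE B (Python) =====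
-- def patch_legacy_gl_fragcolor(source: str) -> str:
--     """Patch fragment shader to support legacy gl_FragColor in GLSL 330+."""
--     lines = source.splitlines()
--     if 'gl_FragColor' not in source:
--         return '\n'.join(lines)
--
--     header = []
--     if 'out vec4' not in source:
--         header.append('out vec4 fragColor;')
--     if '#define gl_FragColor' not in source:
--         header.append('#define gl_FragColor fragColor')
--
--     def fix(line):
--         if line.strip().startswith('#define') or 'gl_FragColor' not in line:
--             return line
--         return line.replace('gl_FragColor', 'fragColor')
--
--     # one walk over the lines: emit fixed lines, and right after the first
--     # '#version' line splice in the header block and flush the rest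
--     out = []
--     it = iter(lines)
--     for line in it:
--         out.append(fix(line))
--         if line.strip().startswith('#version'):
--             out += header
--             out += [fix(l) for l in it]
--             break
--     else:  # no '#version' line anywhere: header goes in front
--         out = header + out
--     return '\n'.join(out)
-- ===== Notes on version B (the rewrite author's own statement) =====
-- stated objective: alternative
-- what changed: B tests the three marker substrings on the raw source string instead of scanning line by line, builds the header block once, and splices it in during a single walk over the lines that also rewrites each line as it goes, instead of A's four per-line scans, index arithmetic and in-place list.insert mutation.
import Mathlib
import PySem

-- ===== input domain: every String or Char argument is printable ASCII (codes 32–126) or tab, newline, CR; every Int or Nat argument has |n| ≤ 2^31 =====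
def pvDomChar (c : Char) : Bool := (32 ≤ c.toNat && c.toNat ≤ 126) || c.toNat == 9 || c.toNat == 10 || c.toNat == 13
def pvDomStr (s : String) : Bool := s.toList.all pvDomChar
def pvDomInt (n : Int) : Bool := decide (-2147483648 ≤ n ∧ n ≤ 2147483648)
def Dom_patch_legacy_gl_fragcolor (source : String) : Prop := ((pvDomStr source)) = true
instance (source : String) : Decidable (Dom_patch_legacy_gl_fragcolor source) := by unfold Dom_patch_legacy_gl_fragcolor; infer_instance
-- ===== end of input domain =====

-- B tests the marker substrings on the raw source string instead of per line, builds the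
-- header block once, and splices it in during a single walk over the lines that also
-- rewrites each line, instead of A's four scans plus index arithmetic and in-place
-- list inserts; same cost, different decomposition.

-- ===== PORT A =====

-- A's break-on-first-match loop searching for the '#version' line
def pvVersionIdxA : List String → Nat → Option Nat
  | [], _ => none
  | l :: rest, i =>
      if PySem.Str.startswith (PySem.Str.strip l) "#version" then some i
      else pvVersionIdxA rest (i + 1)

-- A's in-place rewrite of one line (the body of the final for loop)
def pvRewriteA (line : String) : String :=
  if PySem.Str.isIn "gl_FragColor" line
      && !(PySem.Str.startswith (PySem.Str.strip line) "#define") then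
    PySem.Str.replace line "gl_FragColor" "fragColor"
  else line

def patch_legacy_gl_fragcolor (source : String) : String :=
  let lines := PySem.Str.splitlines source
  let version_idx : Option Nat := pvVersionIdxA lines 0
  let uses_gl_fragcolor := lines.any (fun l => PySem.Str.isIn "gl_FragColor" l)
  let already_has_out := lines.any (fun l => PySem.Str.isIn "out vec4" l)
  let already_has_define := lines.any (fun l => PySem.Str.isIn "#define gl_FragColor" l)
  if uses_gl_fragcolor then
    let insert_idx : Nat := match version_idx with | some i => i + 1 | none => 0
    let lines := if !already_has_out then
        PySem.List.insert lines (insert_idx : Int) "out vec4 fragColor;" else lines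
    let insert_idx := if !already_has_out then insert_idx + 1 else insert_idx
    let lines := if !already_has_define then
        PySem.List.insert lines (insert_idx : Int) "#define gl_FragColor fragColor" else lines
    let lines := lines.map pvRewriteA
    PySem.Str.join "\n" lines
  else
    PySem.Str.join "\n" lines

-- ===== PORT B =====

-- B's per-line fix helper (early-return shape of Source B's fix)
def pvFixB (line : String) : String :=
  if PySem.Str.startswith (PySem.Str.strip line) "#define"
      || !PySem.Str.isIn "gl_FragColor" line then line
  else PySem.Str.replace line "gl_FragColor" "fragColor"

-- B's single walk over the lines (Source B's for/else loop as structural recursion: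
-- the break branch returns 'some' with the rest flushed; a completed loop is 'none')
def pvSpliceB (header : List String) : List String → Option (List String)
  | [] => none
  | first :: tail =>
      if PySem.Str.startswith (PySem.Str.strip first) "#version" then
        some (pvFixB first :: (header ++ tail.map pvFixB))
      else
        match pvSpliceB header tail with
        | none => none
        | some out => some (pvFixB first :: out)

def patch_legacy_gl_fragcolor_alt (source : String) : String :=
  let lines := PySem.Str.splitlines source
  if !PySem.Str.isIn "gl_FragColor" source then
    PySem.Str.join "\n" lines
  else
    let header :=
      (if !PySem.Str.isIn "out vec4" source then ["out vec4 fragColor;"] else [])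
        ++ (if !PySem.Str.isIn "#define gl_FragColor" source then
              ["#define gl_FragColor fragColor"] else [])
    let out := match pvSpliceB header lines with
      | some out => out
      | none => header ++ lines.map pvFixB
    PySem.Str.join "\n" out

-- ===== PRECONDITION & SPEC =====
def Spec_patch_legacy_gl_fragcolor (source : String) (out : String) : Prop := out = patch_legacy_gl_fragcolor_alt source
instance (source : String) (out : String) : Decidable (Spec_patch_legacy_gl_fragcolor source out) := by unfold Spec_patch_legacy_gl_fragcolor; infer_instance

-- ===== CLAIM (what is proved, stated in full; the proofs are below) =====
def Claim_equal_patch_legacy_gl_fragcolor : Prop := ∀ (source : String), Dom_patch_legacy_gl_fragcolor source → Spec_patch_legacy_gl_fragcolor source (patch_legacy_gl_fragcolor source)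

-- ===== LEMMAS AND PROOFS =====

-- The line-break predicate used by PySem.Chars.splitlines
def pvBrk (c : Char) : Bool :=
  decide (c.toNat = 10) || decide (c.toNat = 13) || decide (c.toNat = 11) ||
    decide (c.toNat = 12) || decide (c.toNat = 28) || decide (c.toNat = 29) ||
    decide (c.toNat = 30) || decide (c.toNat = 133) || decide (c.toNat = 8232) ||
    decide (c.toNat = 8233)

-- prepend a partial line to the first line of a line list
def pvConsHead (p : List Char) : List (List Char) → List (List Char)
  | [] => if p.isEmpty then [] else [p]
  | l :: ls => (p ++ l) :: ls

-- accumulator-free specification of splitlines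
def pvLines (isB : Char → Bool) : List Char → List (List Char)
  | [] => []
  | '\x0d' :: '\n' :: rest => [] :: pvLines isB rest
  | c :: rest =>
      if isB c then [] :: pvLines isB rest
      else pvConsHead [c] (pvLines isB rest)

theorem pvConsHead_nil (L : List (List Char)) : pvConsHead [] L = L := by
  cases L <;> simp [pvConsHead]

theorem pvConsHead_append (p : List Char) (c : Char) (L : List (List Char)) :
    pvConsHead (p ++ [c]) L = pvConsHead p (pvConsHead [c] L) := by
  cases L <;> simp [pvConsHead]

theorem pvGo_eq_lines (isB : Char → Bool) (s cur : List Char) (acc : List (List Char)) :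
    PySem.Chars.splitlines.go isB s cur acc
      = acc.reverse ++ pvConsHead cur.reverse (pvLines isB s) := by
  induction s, cur, acc using PySem.Chars.splitlines.go.induct (isB := isB) with
  | case1 cur acc h =>
      rw [PySem.Chars.splitlines.go.eq_1]
      simp at h
      simp [h, pvLines, pvConsHead]
  | case2 cur acc h =>
      rw [PySem.Chars.splitlines.go.eq_1]
      simp [List.isEmpty_iff] at h
      simp [h, pvLines, pvConsHead]
  | case3 rest cur acc ih =>
      rw [PySem.Chars.splitlines.go.eq_2, ih]
      simp [pvLines, pvConsHead]
      cases pvLines isB rest <;> rfl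
  | case4 c rest cur acc hne hB ih =>
      rw [PySem.Chars.splitlines.go.eq_3 _ _ _ _ _ hne, if_pos hB, ih,
        pvLines.eq_3 _ _ _ hne, if_pos hB]
      simp [pvConsHead]
      cases pvLines isB rest <;> rfl
  | case5 c rest cur acc hne hB ih =>
      rw [PySem.Chars.splitlines.go.eq_3 _ _ _ _ _ hne, if_neg hB, ih,
        pvLines.eq_3 _ _ _ hne, if_neg hB]
      have h2 : (c :: cur).reverse = cur.reverse ++ [c] := by simp
      rw [h2, pvConsHead_append]

theorem pvSplitlines_eq (s : List Char) :
    PySem.Chars.splitlines s = pvLines pvBrk s := by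
  show PySem.Chars.splitlines.go _ s [] [] = _
  rw [pvGo_eq_lines]
  simp [pvConsHead_nil]
  rfl

theorem pvLines_ne_nil (isB : Char → Bool) (s : List Char) (h : s ≠ []) :
    pvLines isB s ≠ [] := by
  induction s using pvLines.induct (isB := isB) with
  | case1 => exact absurd rfl h
  | case2 rest ih => simp [pvLines]
  | case3 c rest hne hB ih =>
      rw [pvLines.eq_3 _ _ _ hne, if_pos hB]; simp
  | case4 c rest hne hB ih =>
      rw [pvLines.eq_3 _ _ _ hne, if_neg hB]
      cases hL : pvLines isB rest <;> simp [pvConsHead]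

theorem pvLines_head (isB : Char → Bool) (hr : isB '\x0d' = true) :
    ∀ (s l : List Char) (ls : List (List Char)),
      pvLines isB s = l :: ls → l = s.takeWhile (fun c => !isB c) := by
  intro s
  induction s using pvLines.induct (isB := isB) with
  | case1 => intro l ls h; simp [pvLines] at h
  | case2 rest ih =>
      intro l ls h
      simp [pvLines] at h
      simp [List.takeWhile_cons, hr, h.1]
  | case3 c rest hne hB ih =>
      intro l ls h
      rw [pvLines.eq_3 _ _ _ hne, if_pos hB] at h
      simp at h
      simp [List.takeWhile_cons, hB, h.1]
  | case4 c rest hne hB ih =>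
      intro l ls h
      rw [pvLines.eq_3 _ _ _ hne, if_neg hB] at h
      simp at hB
      cases hL : pvLines isB rest with
      | nil =>
          rw [hL] at h; simp [pvConsHead] at h
          have hrest : rest = [] := by
            by_contra hr2
            exact pvLines_ne_nil isB rest hr2 hL
          simp [h.1.symm, hrest, List.takeWhile_cons, hB]
      | cons l0 ls0 =>
          rw [hL] at h; simp [pvConsHead] at h
          have := ih l0 ls0 hL
          simp [List.takeWhile_cons, hB, ← h.1, this]

theorem pvPrefix_takeWhile (p : Char → Bool) (sub : List Char)
    (h : ∀ c ∈ sub, p c = true) : ∀ (t : List Char),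
    sub <+: t ↔ sub <+: t.takeWhile p := by
  induction sub with
  | nil => intro t; simp
  | cons a sub' ih =>
      intro t
      cases t with
      | nil => simp
      | cons b t' =>
          have hpa : p a = true := h a (by simp)
          constructor
          · intro hp
            rw [List.cons_prefix_cons] at hp
            obtain ⟨rfl, hp'⟩ := hp
            rw [List.takeWhile_cons, if_pos hpa, List.cons_prefix_cons]
            exact ⟨rfl, (ih (fun c hc => h c (by simp [hc])) t').mp hp'⟩
          · intro hp
            by_cases hpb : p b = true
            · rw [List.takeWhile_cons, if_pos hpb, List.cons_prefix_cons] at hp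
              obtain ⟨rfl, hp'⟩ := hp
              rw [List.cons_prefix_cons]
              exact ⟨rfl, (ih (fun c hc => h c (by simp [hc])) t').mpr hp'⟩
            · rw [List.takeWhile_cons, if_neg hpb] at hp
              simp at hp

theorem pvNoPrefix_brk (isB : Char → Bool) (sub : List Char) (hne : sub ≠ [])
    (hfree : ∀ c ∈ sub, isB c = false) (c : Char) (hc : isB c = true) (t : List Char) :
    ¬ sub <+: c :: t := by
  intro hp
  cases sub with
  | nil => exact hne rfl
  | cons a sub' =>
      rw [List.cons_prefix_cons] at hp
      have h1 := hfree a (by simp)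
      rw [hp.1] at h1
      rw [h1] at hc
      exact Bool.false_ne_true hc

theorem pvInfix_lines (isB : Char → Bool) (hr : isB '\x0d' = true) (hn : isB '\n' = true)
    (sub : List Char) (hne : sub ≠ []) (hfree : ∀ c ∈ sub, isB c = false) :
    ∀ s : List Char, sub <:+: s ↔ ∃ l ∈ pvLines isB s, sub <:+: l := by
  intro s
  have hsub : ∀ c ∈ sub, (fun c => !isB c) c = true := by
    intro c hc; simp [hfree c hc]
  induction s using pvLines.induct (isB := isB) with
  | case1 => simp [pvLines, List.infix_nil, hne]
  | case2 rest ih =>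
      rw [show pvLines isB ('\x0d' :: '\n' :: rest) = [] :: pvLines isB rest from rfl]
      rw [List.infix_cons_iff, List.infix_cons_iff]
      simp only [List.mem_cons, List.infix_nil]
      constructor
      · rintro (hp | hp | hi)
        · exact absurd hp (pvNoPrefix_brk isB sub hne hfree _ hr _)
        · exact absurd hp (pvNoPrefix_brk isB sub hne hfree _ hn _)
        · obtain ⟨l, hl, hi⟩ := ih.mp hi
          exact ⟨l, Or.inr hl, hi⟩
      · rintro ⟨l, (rfl | hl), hi⟩
        · exact absurd (List.eq_nil_of_infix_nil hi) hne
        · exact Or.inr (Or.inr (ih.mpr ⟨l, hl, hi⟩))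
  | case3 c rest hnp hB ih =>
      rw [pvLines.eq_3 _ _ _ hnp, if_pos hB, List.infix_cons_iff]
      constructor
      · rintro (hp | hi)
        · exact absurd hp (pvNoPrefix_brk isB sub hne hfree _ hB _)
        · obtain ⟨l, hl, hi⟩ := ih.mp hi
          exact ⟨l, by simp [hl], hi⟩
      · rintro ⟨l, hl, hi⟩
        simp at hl
        rcases hl with rfl | hl
        · exact absurd (List.eq_nil_of_infix_nil hi) hne
        · exact Or.inr (ih.mpr ⟨l, hl, hi⟩)
  | case4 c rest hnp hB ih =>
      simp only [Bool.not_eq_true] at hB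
      rw [pvLines.eq_3 _ _ _ hnp, if_neg (by simp [hB])]
      cases hL : pvLines isB rest with
      | nil =>
          have hrest : rest = [] := by
            by_contra h2
            exact pvLines_ne_nil isB rest h2 hL
          subst hrest
          simp [pvConsHead]
      | cons l0 ls0 =>
          have hl0 : l0 = rest.takeWhile (fun c => !isB c) :=
            pvLines_head isB hr rest l0 ls0 hL
          have htw1 : sub <+: c :: rest ↔ sub <+: c :: l0 := by
            rw [pvPrefix_takeWhile _ sub hsub (c :: rest),
                pvPrefix_takeWhile _ sub hsub (c :: l0)]
            rw [List.takeWhile_cons, List.takeWhile_cons, if_pos (by simp [hB]),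
              if_pos (by simp [hB]), hl0, List.takeWhile_idem]
          rw [List.infix_cons_iff]
          simp only [pvConsHead, List.singleton_append, List.mem_cons]
          constructor
          · rintro (hp | hi)
            · exact ⟨c :: l0, Or.inl rfl, (htw1.mp hp).isInfix⟩
            · obtain ⟨l, hl, hi⟩ := ih.mp hi
              rw [hL] at hl
              simp at hl
              rcases hl with rfl | hl
              · exact ⟨c :: l, Or.inl rfl, hi.trans (List.suffix_cons c _).isInfix⟩
              · exact ⟨l, Or.inr hl, hi⟩
          · rintro ⟨l, hl, hi⟩
            rcases hl with rfl | hl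
            · rw [List.infix_cons_iff] at hi
              rcases hi with hp | hi
              · exact Or.inl (htw1.mpr hp)
              · exact Or.inr (ih.mpr ⟨l0, by rw [hL]; simp, hi⟩)
            · exact Or.inr (ih.mpr ⟨l, by rw [hL]; simp [hl], hi⟩)

theorem pvIsIn_splitlines (sub : String) (hne : sub.toList ≠ [])
    (hfree : ∀ c ∈ sub.toList, pvBrk c = false) (source : String) :
    PySem.Str.isIn sub source
      = (PySem.Str.splitlines source).any (fun l => PySem.Str.isIn sub l) := by
  show _ = ((PySem.Chars.splitlines source.toList).map String.ofList).any _
  rw [List.any_map, pvSplitlines_eq]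
  rw [Bool.eq_iff_iff]
  simp only [PySem.Str.isIn_eq, Function.comp, String.toList_ofList, List.any_eq_true,
    PySem.Chars.isIn_iff_infix]
  exact pvInfix_lines pvBrk (by decide) (by decide) sub.toList hne hfree source.toList

theorem pvVersionIdxA_shift (lines : List String) (i : Nat) :
    pvVersionIdxA lines i = (pvVersionIdxA lines 0).map (· + i) := by
  induction lines generalizing i with
  | nil => simp [pvVersionIdxA]
  | cons l rest ih =>
      simp only [pvVersionIdxA]
      split
      · simp
      · rw [ih (i + 1), ih 1]
        cases pvVersionIdxA rest 0 <;> simp <;> omega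

theorem pvSplice_spec (header : List String) (lines : List String) :
    (pvVersionIdxA lines 0 = none ∧ pvSpliceB header lines = none) ∨
      (∃ j, pvVersionIdxA lines 0 = some j ∧ j < lines.length ∧
        pvSpliceB header lines
          = some ((lines.take (j + 1)).map pvFixB ++ header
              ++ (lines.drop (j + 1)).map pvFixB)) := by
  induction lines with
  | nil => exact Or.inl ⟨rfl, rfl⟩
  | cons first tail ih =>
      by_cases hv : PySem.Str.startswith (PySem.Str.strip first) "#version" = true
      · refine Or.inr ⟨0, ?_, by simp, ?_⟩
        · simp only [pvVersionIdxA]; rw [if_pos hv]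
        · simp only [pvSpliceB]; rw [if_pos hv]; simp
      · rcases ih with ⟨h1, h2⟩ | ⟨j, h1, hlt, h2⟩
        · refine Or.inl ⟨?_, ?_⟩
          · simp only [pvVersionIdxA]
            rw [if_neg hv, pvVersionIdxA_shift tail 1, h1]; rfl
          · simp only [pvSpliceB]; rw [if_neg hv, h2]
        · refine Or.inr ⟨j + 1, ?_, by simp; omega, ?_⟩
          · simp only [pvVersionIdxA]
            rw [if_neg hv, pvVersionIdxA_shift tail 1, h1]; rfl
          · simp only [pvSpliceB]; rw [if_neg hv, h2]
            simp [List.take_succ_cons, List.drop_succ_cons]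

theorem pvFixB_eq_rewriteA : pvFixB = pvRewriteA := by
  funext l
  unfold pvFixB pvRewriteA
  rcases h1 : PySem.Str.isIn "gl_FragColor" l <;>
    rcases h2 : PySem.Str.startswith (PySem.Str.strip l) "#define" <;> simp

theorem pvFix_out : pvRewriteA "out vec4 fragColor;" = "out vec4 fragColor;" := by decide

theorem pvFix_define :
    pvRewriteA "#define gl_FragColor fragColor" = "#define gl_FragColor fragColor" := by decide

theorem pv_insert_split (lines : List String) (k : Nat) (x : String) (h : k ≤ lines.length) :
    PySem.List.insert lines (k : Int) x = lines.take k ++ x :: lines.drop k :=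
  PySem.List.insert_natCast lines k x h

-- ===== VERDICT (by name: the statement is the Claim_ definition above) =====
theorem patch_legacy_gl_fragcolor_spec : Claim_equal_patch_legacy_gl_fragcolor := by
  intro source _
  unfold Spec_patch_legacy_gl_fragcolor patch_legacy_gl_fragcolor patch_legacy_gl_fragcolor_alt
  have hs1 : "gl_FragColor".toList = ['g','l','_','F','r','a','g','C','o','l','o','r'] := by simp
  have hs2 : "out vec4".toList = ['o','u','t',' ','v','e','c','4'] := by simp
  have hs3 : "#define gl_FragColor".toList
      = ['#','d','e','f','i','n','e',' ','g','l','_','F','r','a','g','C','o','l','o','r'] := by simp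
  have hU := pvIsIn_splitlines "gl_FragColor" (by simp)
    (by rw [hs1]; intro c hc; fin_cases hc <;> rfl) source
  have hO := pvIsIn_splitlines "out vec4" (by simp)
    (by rw [hs2]; intro c hc; fin_cases hc <;> rfl) source
  have hD := pvIsIn_splitlines "#define gl_FragColor" (by simp)
    (by rw [hs3]; intro c hc; fin_cases hc <;> rfl) source
  set lines := PySem.Str.splitlines source with hlines
  by_cases hu : PySem.Str.isIn "gl_FragColor" source = true
  · have hu' : lines.any (fun l => PySem.Str.isIn "gl_FragColor" l) = true := by
      rw [← hU]; exact hu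
    simp only [hu, hu', Bool.not_true, if_true, if_false, Bool.false_eq_true]
    set HS := (if !PySem.Str.isIn "out vec4" source then ["out vec4 fragColor;"] else [])
        ++ (if !PySem.Str.isIn "#define gl_FragColor" source then
              ["#define gl_FragColor fragColor"] else []) with hHS
    rcases pvSplice_spec HS lines with ⟨h1, h2⟩ | ⟨j, h1, hlt, h2⟩
    · -- no '#version' line: header goes in front
      rw [h1, h2]
      by_cases ho : PySem.Str.isIn "out vec4" source = true <;>
      by_cases hd : PySem.Str.isIn "#define gl_FragColor" source = true <;>
        [skip; skip; skip; skip] <;>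
      · have ho' : lines.any (fun l => PySem.Str.isIn "out vec4" l)
            = PySem.Str.isIn "out vec4" source := hO.symm
        have hd' : lines.any (fun l => PySem.Str.isIn "#define gl_FragColor" l)
            = PySem.Str.isIn "#define gl_FragColor" source := hD.symm
        simp only [ho, hd] at ho' hd'
        have hins0 : ∀ x : String, PySem.List.insert lines (0 : Int) x = x :: lines := by
          intro x
          have h := pv_insert_split lines 0 x (Nat.zero_le _)
          simpa using h
        have hins1 : ∀ a x : String,
            PySem.List.insert (a :: lines) (1 : Int) x = a :: x :: lines := by
          intro a x
          have h := pv_insert_split (a :: lines) 1 x (by simp)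
          simpa using h
        simp only [ho', hd', ho, hd, hHS, Bool.not_true, Bool.not_false, if_true, if_false,
          Bool.false_eq_true, pvFixB_eq_rewriteA]
        simp [hins0, hins1, pvFix_out, pvFix_define]
    · -- header spliced right after the '#version' line at index j
      rw [h1, h2]
      have hk : j + 1 ≤ lines.length := hlt
      have htk : (lines.take (j + 1)).length = j + 1 := by simp [hk]
      by_cases ho : PySem.Str.isIn "out vec4" source = true <;>
      by_cases hd : PySem.Str.isIn "#define gl_FragColor" source = true <;>
        [skip; skip; skip; skip] <;>
      · have ho' : lines.any (fun l => PySem.Str.isIn "out vec4" l)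
            = PySem.Str.isIn "out vec4" source := hO.symm
        have hd' : lines.any (fun l => PySem.Str.isIn "#define gl_FragColor" l)
            = PySem.Str.isIn "#define gl_FragColor" source := hD.symm
        simp only [ho, hd] at ho' hd'
        simp only [ho', hd', ho, hd, hHS, Bool.not_true, Bool.not_false, if_true, if_false,
          Bool.false_eq_true, pvFixB_eq_rewriteA]
        first
        | -- both markers present: nothing inserted
          (simp; done)
        | -- only one line inserted, at position j + 1
          (rw [pv_insert_split lines (j + 1) _ hk]
           simp [pvFix_out, pvFix_define, List.map_take, List.map_drop]
           done)
        | -- both lines inserted: out at j + 1, then define at j + 2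
          (rw [pv_insert_split lines (j + 1) _ hk]
           have h2' : j + 1 + 1 ≤
              (lines.take (j + 1) ++ "out vec4 fragColor;" :: lines.drop (j + 1)).length := by
             simp; omega
           rw [pv_insert_split _ (j + 1 + 1) _ h2']
           have hta : (lines.take (j + 1) ++ "out vec4 fragColor;" :: lines.drop (j + 1)).take (j + 1 + 1)
               = lines.take (j + 1) ++ ["out vec4 fragColor;"] := by
             rw [List.take_append, htk]; simp
           have hda : (lines.take (j + 1) ++ "out vec4 fragColor;" :: lines.drop (j + 1)).drop (j + 1 + 1)
               = lines.drop (j + 1) := by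
             rw [List.drop_append, htk]; simp
           rw [hta, hda]
           simp [pvFix_out, pvFix_define, List.map_take, List.map_drop])
  · have hu2 : PySem.Str.isIn "gl_FragColor" source = false := by simpa using hu
    have hu' : lines.any (fun l => PySem.Str.isIn "gl_FragColor" l) = false := by
      rw [← hU]; exact hu2
    simp only [hu2, hu', Bool.not_false, Bool.false_eq_true, if_false, if_true]
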